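/- GENERATED by farm/mkstatement.py from design/units.tsv (unit `DGifSlurp.12`) and the assertions of Gif/Spec/Seg_DGifSlurp.lean — do not edit.
   THE STATEMENT of the proof unit `DGifSlurp.12`: segment 12 of `DGifSlurp` (13 instructions; entries 0x10a81f;
   exits 0x10a82a,0x10a8ed; ranges 0x10a81f-0x10a82a,0x10a9cd-0x10a9fc)
   takes each of its entry assertions to one of its exit assertions (`Gif.Spec.DGifSlurp.Seg12`), given the contracts of its callees.
   What the names mean: ProgX/Base/Spec/Basic.lean (the shared hypotheses), Gif/Spec/Seg_DGifSlurp.lean (the assertions). The theorem to prove: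
   `theorem DGifSlurp_12_ok : Gif.Spec.DGifSlurp_12.Statement`. -/
import Gif.Code
import Gif.Dec.All
import Gif.Labels
import Gif.Spec.Seg_DGifSlurp
namespace Gif.Spec.DGifSlurp_12
open X86 X86.User Asan

/-- The statement of unit `DGifSlurp.12`. -/
def Statement : Prop :=
  ∀ (Lay : Layout) (_hLay : Lay.hi = 0x1000000) (μ : Microarch) (_hμ : UserX.MicroOK μ) (u₀ : State)
    (_hcode : HasCodeNat Lay u₀ Gif.L.DGifSlurp.entry Gif.Code.code_DGifSlurp.nat Gif.L.DGifSlurp.size)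
    (_h_asan_load4_noabort : Asan.SmallCheck Lay μ ProgX.Base.WayInv (ProgX.Base.CodeOK u₀) [.rax, .rcx, .rdx] 4 ProgX.Base.L.__asan_load4_noabort.entry)
    (_h_asan_store4_noabort : Asan.SmallCheck Lay μ ProgX.Base.WayInv (ProgX.Base.CodeOK u₀) [.rax, .rcx, .rdx] 4 ProgX.Base.L.__asan_store4_noabort.entry),
    Gif.Spec.DGifSlurp.Seg12 Lay μ u₀

end Gif.Spec.DGifSlurp_12
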